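-- pv_equiv track=rewrite | github.com/LuculentDig/vision1 | paint.py | solution
-- ===== SOURCE A (Python) =====
-- def solution(A):
--     # write your code in Python 3.6
--     the_max=max(A)
--     row_num=len(A)
--     matrix=[]
--     for i in range(row_num):
--         row=[]
--         for j in range(the_max):
--             row.append(0)
--
--         matrix.append(row)
--
--
--     # we have a zero matrix
--     for i in range(row_num):
--         for j in range(A[i]):
--             matrix[i][j]=1
--
--     total_paint=0
--     for j in range(len(matrix[0])):
--         paint_count=0
--         for i in range(row_num):
--             if(matrix[i][j]==1):
--                 paint_count=1
--             else:
--                 total_paint+=paint_count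
--                 paint_count=0
--             if(i==row_num-1 and paint_count==1):
--                 total_paint+=paint_count
--                 paint_count=0
--     return total_paint
-- ===== SOURCE B (Python) =====
-- def solution(A):
--     # closed form: total painted runs = sum over i of max(0, h_i - h_{i-1})
--     # with clamped heights h = max(A[i], 0), h_{-1} = 0.  O(n), one pass.
--     total = 0
--     prev = 0
--     for a in A:
--         h = a if a > 0 else 0
--         if h > prev:
--             total += h - prev
--         prev = h
--     return total
-- ===== Notes on version B (the rewrite author's own statement) =====
-- stated objective: faster
-- what changed: A builds an n×max(A) 0/1 matrix and counts vertical runs of 1s column by column; B computes the same total in one pass over the list as the sum of positive clamped-height increases max(0, max(A[i],0) - max(A[i-1],0)).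
import Mathlib
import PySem

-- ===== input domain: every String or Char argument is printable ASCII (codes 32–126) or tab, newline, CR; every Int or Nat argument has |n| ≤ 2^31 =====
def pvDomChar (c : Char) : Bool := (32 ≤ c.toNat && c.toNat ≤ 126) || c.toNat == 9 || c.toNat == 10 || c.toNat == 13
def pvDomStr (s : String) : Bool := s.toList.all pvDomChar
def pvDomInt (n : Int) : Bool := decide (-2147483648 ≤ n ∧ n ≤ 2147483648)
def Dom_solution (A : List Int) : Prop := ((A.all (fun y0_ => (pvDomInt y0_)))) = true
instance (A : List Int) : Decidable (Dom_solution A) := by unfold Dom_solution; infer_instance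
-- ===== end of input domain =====

-- B replaces A's painted-matrix column scan by a one-pass sum of positive height
-- increments max(0, h_i - h_{i-1}); a timing run decides whether to call it faster.


-- ===== PORT A =====
-- row = [0]*the_max built by the append loop
def pyA_buildRow (theMax : Int) : List Int :=
  (PySem.List.pyRange 0 theMax).foldl (fun r _j => r ++ [(0 : Int)]) []

-- matrix = row appended row_num times
def pyA_buildMatrix (rowNum theMax : Int) : List (List Int) :=
  (PySem.List.pyRange 0 rowNum).foldl (fun m _i => m ++ [pyA_buildRow theMax]) []

-- for i in range(row_num): for j in range(A[i]): matrix[i][j] = 1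
-- (indices produced by range are in bounds here, so the total pyGetD/pySetD forms are exact)
def pyA_paint (A : List Int) (rowNum : Int) (m0 : List (List Int)) : List (List Int) :=
  (PySem.List.pyRange 0 rowNum).foldl
    (fun m i =>
      (PySem.List.pyRange 0 (PySem.List.pyGetD A i 0)).foldl
        (fun m' j => PySem.List.pySetD m' i (PySem.List.pySetD (PySem.List.pyGetD m' i []) j 1))
        m)
    m0

-- the double column scan accumulating total_paint / paint_count
def pyA_scan (matrix : List (List Int)) (rowNum : Int) : Int :=
  (PySem.List.pyRange 0 (((PySem.List.pyGetD matrix 0 []).length : Int))).foldl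
    (fun total j =>
      ((PySem.List.pyRange 0 rowNum).foldl
        (fun (tp : Int × Int) i =>
          let tp2 : Int × Int :=
            if PySem.List.pyGetD (PySem.List.pyGetD matrix i []) j 0 == 1 then (tp.1, 1)
            else (tp.1 + tp.2, 0)
          if i == rowNum - 1 && tp2.2 == 1 then (tp2.1 + tp2.2, 0) else tp2)
        (total, 0)).1)
    0

def solution (A : List Int) : Int :=
  match PySem.List.max? A id with
  | none => 0  -- max([]) raises ValueError in Python; excluded by Pre_solution
  | some theMax =>
      pyA_scan (pyA_paint A (A.length : Int) (pyA_buildMatrix (A.length : Int) theMax)) (A.length : Int)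

-- ===== PORT B =====
def solution_alt (A : List Int) : Int :=
  (A.foldl
    (fun (tp : Int × Int) a =>
      let h : Int := if a > 0 then a else 0
      (if h > tp.2 then tp.1 + (h - tp.2) else tp.1, h))
    (0, 0)).1

-- ===== PRECONDITION & SPEC =====
-- Pre_ excludes only the empty list, on which A raises ValueError (max of empty sequence).
def Pre_solution (A : List Int) : Prop := A ≠ []
instance (A : List Int) : Decidable (Pre_solution A) := by unfold Pre_solution; infer_instance
def pvWitness_solution : List Int := [3, 1, 4]

def Spec_solution (A : List Int) (out : Int) : Prop := out = solution_alt A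
instance (A : List Int) (out : Int) : Decidable (Spec_solution A out) := by unfold Spec_solution; infer_instance

-- ===== CLAIM (what is proved, stated in full; the proofs are below) =====
def Claim_equal_solution : Prop := ∀ (A : List Int), Dom_solution A → Pre_solution A → Spec_solution A (solution A)

-- ===== LEMMAS AND PROOFS =====

-- step of one column's scan: state (total so far, previous cell painted)
def colStep (j : Int) (tp : Int × Int) (a : Int) : Int × Int :=
  if j < a then (tp.1, 1) else (tp.1 + tp.2, 0)

-- runs counted in column j when entered with "previous height p0", plus final flush
def colRunsP (j p0 : Int) (A : List Int) : Int :=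
  let r := A.foldl (colStep j) (0, if j < p0 then 1 else 0)
  r.1 + r.2

-- number of run-ends summed over all columns, entering with previous height prev
def endsCnt (prev : Int) (A : List Int) : Int :=
  match A with
  | [] => max prev 0
  | a :: A' => max 0 (prev - max a 0) + endsCnt a A'

-- painted row of height h in a width-M row
def prow (h M : Nat) : List Int := List.replicate h 1 ++ List.replicate (M - h) 0

-- B's loop step, named so the fold can be reasoned about uniformly
def bstep (tp : Int × Int) (a : Int) : Int × Int :=
  let h : Int := if a > 0 then a else 0
  (if h > tp.2 then tp.1 + (h - tp.2) else tp.1, h)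

lemma buildRow_eq (t : Int) : pyA_buildRow t = List.replicate t.toNat 0 := by
  unfold pyA_buildRow
  rw [PySem.List.foldl_append_singleton_eq_map (fun _ => (0:Int))]
  simp [List.map_const', PySem.List.length_pyRange_one, List.eq_replicate_iff]
lemma buildMatrix_eq (n t : Int) :
    pyA_buildMatrix n t = List.replicate n.toNat (List.replicate t.toNat 0) := by
  unfold pyA_buildMatrix
  simp only [buildRow_eq]
  rw [PySem.List.foldl_append_singleton_eq_map (fun _ => List.replicate t.toNat (0 : Int))]
  simp [List.map_const', PySem.List.length_pyRange_one]

lemma paintRowFold_natCast (t : Nat) (row : List Int) (ht : t ≤ row.length) :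
    (PySem.List.pyRange 0 (t : Int)).foldl (fun r j => PySem.List.pySetD r j 1) row
      = List.replicate t 1 ++ row.drop t := by
  induction t with
  | zero => simp [PySem.List.pyRange_one_eq_nil (le_refl 0)]
  | succ t ih =>
    have h1 : ((t + 1 : Nat) : Int) = (t : Int) + 1 := by push_cast; ring
    rw [h1, PySem.List.pyRange_one_succ_right (by positivity), List.foldl_append]
    rw [ih (by omega)]
    have ht' : t < row.length := by omega
    simp only [List.foldl_cons, List.foldl_nil, PySem.List.pySetD_natCast]
    rw [List.set_append]
    simp only [List.length_replicate, lt_irrefl, if_neg (lt_irrefl t), Nat.sub_self]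
    rw [List.drop_eq_getElem_cons ht', List.set_cons_zero, List.replicate_succ']
    simp

lemma paintRowFold_prow (a : Int) (M : Nat) (ha : a ≤ (M : Int)) :
    (PySem.List.pyRange 0 a).foldl (fun r j => PySem.List.pySetD r j 1) (List.replicate M 0)
      = prow a.toNat M := by
  by_cases h : a ≤ 0
  · rw [PySem.List.pyRange_one_eq_nil h]
    simp [prow, Int.toNat_of_nonpos h]
  · push_neg at h
    have heq : a = ((a.toNat : Nat) : Int) := by omega
    rw [heq, paintRowFold_natCast a.toNat _ (by simp; omega)]
    have h2 : (max a 0).toNat = a.toNat := by omega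
    simp [prow, List.drop_replicate, h2]

lemma paint_inner (js : List Int) :
    ∀ (m : List (List Int)) (i : Nat), i < m.length →
      js.foldl (fun m' j => PySem.List.pySetD m' (i : Int)
                  (PySem.List.pySetD (PySem.List.pyGetD m' (i : Int) []) j 1)) m
        = PySem.List.pySetD m (i : Int)
            (js.foldl (fun r j => PySem.List.pySetD r j 1) (PySem.List.pyGetD m (i : Int) [])) := by
  induction js with
  | nil =>
    intro m i hi
    simp only [List.foldl_nil, PySem.List.pySetD_natCast, PySem.List.pyGetD_natCast]
    rw [List.getD_eq_getElem _ _ hi, List.set_getElem_self]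
  | cons j js ih =>
    intro m i hi
    simp only [List.foldl_cons]
    rw [ih _ i (by simp [PySem.List.length_pySetD]; omega)]
    simp only [PySem.List.pySetD_natCast, PySem.List.pyGetD_natCast]
    rw [List.getD_eq_getElem _ _ (by simpa using hi)]
    simp [List.set_set, List.getElem?_set, hi]

lemma paint_eq (A : List Int) (zrow : List Int) :
    ∀ (t : Nat), t ≤ A.length →
      (PySem.List.pyRange 0 (t : Int)).foldl
        (fun m i =>
          (PySem.List.pyRange 0 (PySem.List.pyGetD A i 0)).foldl
            (fun m' j => PySem.List.pySetD m' i (PySem.List.pySetD (PySem.List.pyGetD m' i []) j 1))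
            m)
        (List.replicate A.length zrow)
      = (A.take t).map (fun a =>
          (PySem.List.pyRange 0 a).foldl (fun r j => PySem.List.pySetD r j 1) zrow)
        ++ List.replicate (A.length - t) zrow := by
  intro t
  induction t with
  | zero => simp [PySem.List.pyRange_one_eq_nil (le_refl 0)]
  | succ t ih =>
    intro ht
    have ht' : t < A.length := by omega
    have h1 : ((t + 1 : Nat) : Int) = (t : Int) + 1 := by push_cast; ring
    rw [h1, PySem.List.pyRange_one_succ_right (by positivity), List.foldl_append, ih (by omega)]
    simp only [List.foldl_cons, List.foldl_nil]
    have hl1 : ((A.take t).map (fun a =>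
        (PySem.List.pyRange 0 a).foldl (fun r j => PySem.List.pySetD r j 1) zrow)).length = t := by
      simp [List.length_take]; omega
    have hlen : ((A.take t).map (fun a =>
        (PySem.List.pyRange 0 a).foldl (fun r j => PySem.List.pySetD r j 1) zrow)
        ++ List.replicate (A.length - t) zrow).length = A.length := by
      simp [List.length_take]; omega
    rw [paint_inner _ _ t (by rw [hlen]; exact ht')]
    have hrep : A.length - t = (A.length - (t + 1)) + 1 := by omega
    have hget : PySem.List.pyGetD ((A.take t).map (fun a =>
        (PySem.List.pyRange 0 a).foldl (fun r j => PySem.List.pySetD r j 1) zrow)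
        ++ List.replicate (A.length - t) zrow) (t : Int) [] = zrow := by
      rw [PySem.List.pyGetD_natCast, List.getD_append_right _ _ _ _ (by omega)]
      rw [hl1, Nat.sub_self, hrep, List.replicate_succ]
      rfl
    have hgetA : PySem.List.pyGetD A (t : Int) 0 = A[t] := by
      rw [PySem.List.pyGetD_natCast, List.getD_eq_getElem _ _ ht']
    rw [hget, hgetA, PySem.List.pySetD_natCast]
    rw [List.set_append]
    simp only [hl1, Nat.lt_irrefl, if_false, Nat.sub_self]
    rw [hrep, List.replicate_succ, List.set_cons_zero]
    have htk : A.take (t + 1) = A.take t ++ [A[t]] := by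
      rw [List.take_succ, List.getElem?_eq_getElem ht']
      rfl
    rw [List.take_add_one, List.getElem?_eq_getElem ht']
    simp only [Option.toList_some, List.map_append, List.map_cons, List.map_nil,
      List.append_assoc, List.cons_append, List.nil_append]

lemma matrix_char (A : List Int) (theMax : Int) (hmax : ∀ a ∈ A, a ≤ theMax) :
    pyA_paint A (A.length : Int) (pyA_buildMatrix (A.length : Int) theMax)
      = A.map (fun a => prow a.toNat theMax.toNat) := by
  unfold pyA_paint
  rw [buildMatrix_eq]
  simp only [Int.toNat_natCast]
  rw [show ((A.length : Int)) = ((A.length : Nat) : Int) from rfl,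
    paint_eq A (List.replicate theMax.toNat 0) A.length (le_refl _)]
  simp only [List.take_length, Nat.sub_self, List.replicate_zero, List.append_nil]
  exact List.map_congr_left (fun a ha =>
    paintRowFold_prow a theMax.toNat (by have := hmax a ha; omega))


lemma prow_get (h M : Nat) (hh : h ≤ M) (j : Int) (h0 : 0 ≤ j) (hj : j < (M : Int)) :
    PySem.List.pyGetD (prow h M) j 0 = if j < (h : Int) then 1 else 0 := by
  have hjn : j = ((j.toNat : Nat) : Int) := by omega
  rw [hjn, PySem.List.pyGetD_natCast]
  unfold prow
  by_cases hc : j.toNat < h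
  · rw [List.getD_append _ _ _ _ (by simpa using hc)]
    rw [if_pos (by omega)]
    simp [List.getD_replicate, hc]
  · rw [List.getD_append_right _ _ _ _ (by simpa using hc)]
    rw [if_neg (by omega)]
    simp only [List.length_replicate]
    have hlt : j.toNat - h < M - h := by omega
    rw [List.getD_eq_getElem _ _ (by simpa using hlt)]
    simp

lemma colStep_fold_shift (j : Int) (l : List Int) :
    ∀ (t p : Int), l.foldl (colStep j) (t, p)
      = (t + (l.foldl (colStep j) (0, p)).1, (l.foldl (colStep j) (0, p)).2) := by
  induction l with
  | nil => intro t p; simp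
  | cons a l ih =>
    intro t p
    simp only [List.foldl_cons]
    by_cases h : j < a
    · simp only [colStep, if_pos h]
      exact ih t 1
    · simp only [colStep, if_neg h, zero_add]
      rw [ih (t + p) 0, ih p 0]
      rw [add_assoc]

lemma colRunsP_cons (j prev a : Int) (A : List Int) :
    colRunsP j prev (a :: A)
      = (if a ≤ j ∧ j < prev then 1 else 0) + colRunsP j a A := by
  unfold colRunsP
  simp only [List.foldl_cons, colStep]
  by_cases h : j < a
  · have hfalse : ¬ (a ≤ j ∧ j < prev) := fun hc => absurd hc.1 (by omega)
    simp only [if_pos h, if_neg hfalse]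
    simp
  · have h0 : (if j < a then (1:Int) else 0) = 0 := if_neg h
    have hq : (if a ≤ j ∧ j < prev then (1:Int) else 0) = (if j < prev then 1 else 0) := by
      split_ifs <;> omega
    simp only [if_neg h, h0, hq, zero_add]
    rw [colStep_fold_shift j A (if j < prev then (1:Int) else 0) 0]
    ring

lemma cnt_lemma (N : Nat) (lo hi : Int) :
    ((List.range N).map (fun (k : Nat) => if lo ≤ (k : Int) ∧ (k : Int) < hi then (1 : Int) else 0)).sum
      = max 0 (min hi (N : Int) - max lo 0) := by
  induction N with
  | zero =>
    simp only [List.range_zero, List.map_nil, List.sum_nil]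
    omega
  | succ N ih =>
    rw [List.range_succ, List.map_append, List.sum_append, ih]
    simp only [List.map_cons, List.map_nil, List.sum_cons, List.sum_nil]
    push_cast
    split_ifs <;> omega

lemma sum_colRunsP (A : List Int) :
    ∀ (prev : Int) (N : Nat), prev ≤ (N : Int) → (∀ a ∈ A, a ≤ (N : Int)) →
      ((List.range N).map (fun (k : Nat) => colRunsP (k : Int) prev A)).sum = endsCnt prev A := by
  induction A with
  | nil =>
    intro prev N hp _
    have : ∀ k ∈ List.range N, colRunsP (k : Int) prev [] =
        (fun (k : Nat) => if (0:Int) ≤ (k : Int) ∧ (k : Int) < prev then (1:Int) else 0) k := by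
      intro k _
      simp only [colRunsP, List.foldl_nil]
      have h0 : (0:Int) ≤ (k : Int) := by positivity
      by_cases h : (k : Int) < prev
      · rw [if_pos h, if_pos ⟨h0, h⟩]; ring
      · rw [if_neg h, if_neg (fun hc => h hc.2)]; ring
    rw [List.map_congr_left this, cnt_lemma]
    simp only [endsCnt]
    omega
  | cons a A ih =>
    intro prev N hp hall
    have ha : a ≤ (N : Int) := hall a (by simp)
    have hstep : ∀ k ∈ List.range N, colRunsP (k : Int) prev (a :: A) =
        (fun (k : Nat) => (if a ≤ (k : Int) ∧ (k : Int) < prev then (1:Int) else 0)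
           + colRunsP (k : Int) a A) k := by
      intro k _
      exact colRunsP_cons _ _ _ _

    rw [List.map_congr_left hstep, PySem.List.sum_map_add_int, cnt_lemma,
      ih a N ha (fun b hb => hall b (by simp [hb]))]
    simp only [endsCnt]
    omega

lemma endsCnt_clamp (a : Int) (A : List Int) : endsCnt a A = endsCnt (max a 0) A := by
  cases A with
  | nil => simp only [endsCnt]; omega
  | cons b B => simp only [endsCnt]; omega

lemma bfold_shift (l : List Int) :
    ∀ (t p : Int), l.foldl bstep (t, p)
      = (t + (l.foldl bstep (0, p)).1, (l.foldl bstep (0, p)).2) := by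
  induction l with
  | nil => intro t p; simp
  | cons a l ih =>
    intro t p
    simp only [List.foldl_cons]
    by_cases h : (if a > 0 then a else 0) > p
    · simp only [bstep, if_pos h]
      rw [ih (t + ((if a > 0 then a else 0) - p)) _, ih (0 + ((if a > 0 then a else 0) - p)) _]
      simp only [Prod.mk.injEq, and_true, true_and, and_self]
      ring
    · simp only [bstep, if_neg h]
      exact ih t _

lemma endsCnt_eq_B (A : List Int) :
    ∀ (prev : Int), 0 ≤ prev →
      endsCnt prev A = prev + (A.foldl bstep (0, prev)).1 := by
  induction A with
  | nil => intro prev hp; simp only [endsCnt, List.foldl_nil]; omega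
  | cons a A ih =>
    intro prev hp
    have hcl : endsCnt a A = endsCnt (max a 0) A := endsCnt_clamp a A
    have hmax : (if a > 0 then a else 0) = max a 0 := by split_ifs <;> omega
    simp only [endsCnt, List.foldl_cons]
    have hstep : bstep (0, prev) a
        = (if max a 0 > prev then 0 + (max a 0 - prev) else 0, max a 0) := by
      simp only [bstep]
      rw [hmax]
    rw [hstep, bfold_shift A (if max a 0 > prev then 0 + (max a 0 - prev) else 0) (max a 0),
      hcl, ih (max a 0) (by omega)]
    split_ifs <;> omega

lemma colfold_snd (j : Int) (l : List Int) :
    ∀ (t p : Int), p = 0 ∨ p = 1 → (l.foldl (colStep j) (t, p)).2 = 0 ∨ (l.foldl (colStep j) (t, p)).2 = 1 := by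
  induction l with
  | nil => intro t p hp; simpa using hp
  | cons a l ih =>
    intro t p hp
    simp only [List.foldl_cons, colStep]
    by_cases h : j < a
    · simp only [if_pos h]; exact ih _ _ (Or.inr rfl)
    · simp only [if_neg h]; exact ih _ _ (Or.inl rfl)

lemma scan_plain (A : List Int) (M : Nat) (hall : ∀ a ∈ A, a.toNat ≤ M)
    (j : Int) (hj0 : 0 ≤ j) (hjM : j < (M : Int)) :
    ∀ (m : Nat), m ≤ A.length → ∀ (tp : Int × Int),
      (PySem.List.pyRange 0 (m : Int)).foldl
        (fun (tp : Int × Int) i =>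
          if PySem.List.pyGetD (PySem.List.pyGetD (A.map (fun a => prow a.toNat M)) i []) j 0 == 1
          then (tp.1, 1) else (tp.1 + tp.2, 0)) tp
      = (A.take m).foldl (colStep j) tp := by
  intro m
  induction m with
  | zero => intro _ tp; simp [PySem.List.pyRange_one_eq_nil (le_refl 0)]
  | succ t ih =>
    intro ht tp
    have ht' : t < A.length := by omega
    have h1 : ((t + 1 : Nat) : Int) = (t : Int) + 1 := by push_cast; ring
    rw [h1, PySem.List.pyRange_one_succ_right (by positivity), List.foldl_append, ih (by omega)]
    have htk : A.take (t + 1) = A.take t ++ [A[t]] := by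
      rw [List.take_add_one, List.getElem?_eq_getElem ht']
      rfl
    rw [htk, List.foldl_append]
    simp only [List.foldl_cons, List.foldl_nil]
    have hrow : PySem.List.pyGetD (A.map (fun a => prow a.toNat M)) (t : Int) []
        = prow (A[t].toNat) M := by
      rw [PySem.List.pyGetD_natCast, List.getD_eq_getElem _ _ (by simpa using ht')]
      simp
    rw [hrow, prow_get _ _ (hall A[t] (by simp [List.getElem_mem])) j hj0 hjM]
    by_cases hc : j < A[t]
    · have hcell : (if j < ((A[t].toNat : Nat) : Int) then (1:Int) else 0) = 1 :=
        if_pos (by omega)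
      rw [hcell]
      simp only [colStep, if_pos hc]
      simp
    · have hcell : (if j < ((A[t].toNat : Nat) : Int) then (1:Int) else 0) = 0 :=
        if_neg (by omega)
      rw [hcell]
      simp only [colStep, if_neg hc]
      simp

lemma scan_inner_full (A : List Int) (M : Nat) (hA : A ≠ []) (hall : ∀ a ∈ A, a.toNat ≤ M)
    (j : Int) (hj0 : 0 ≤ j) (hjM : j < (M : Int)) (total : Int) :
    (PySem.List.pyRange 0 ((A.length : Nat) : Int)).foldl
      (fun (tp : Int × Int) i =>
        let tp2 : Int × Int :=
          if PySem.List.pyGetD (PySem.List.pyGetD (A.map (fun a => prow a.toNat M)) i []) j 0 == 1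
          then (tp.1, 1) else (tp.1 + tp.2, 0)
        if i == ((A.length : Nat) : Int) - 1 && tp2.2 == 1 then (tp2.1 + tp2.2, 0) else tp2)
      (total, 0)
    = (total + colRunsP j 0 A, 0) := by
  have hn : 1 ≤ A.length := List.length_pos_iff.mpr hA
  have hsplit : ((A.length : Nat) : Int) = ((A.length - 1 : Nat) : Int) + 1 := by
    push_cast [Nat.cast_sub hn]; ring
  rw [show (PySem.List.pyRange 0 ((A.length : Nat) : Int))
        = PySem.List.pyRange 0 (((A.length - 1 : Nat) : Int) + 1) from by rw [← hsplit],
      PySem.List.pyRange_one_succ_right (by positivity), List.foldl_append]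
  -- prefix: the last-row test is false there
  have hpre := PySem.List.foldl_congr_mem (PySem.List.pyRange 0 ((A.length - 1 : Nat) : Int))
      (fun (tp : Int × Int) i =>
        let tp2 : Int × Int :=
          if PySem.List.pyGetD (PySem.List.pyGetD (A.map (fun a => prow a.toNat M)) i []) j 0 == 1
          then (tp.1, 1) else (tp.1 + tp.2, 0)
        if i == ((A.length : Nat) : Int) - 1 && tp2.2 == 1 then (tp2.1 + tp2.2, 0) else tp2)
      (fun (tp : Int × Int) i =>
        if PySem.List.pyGetD (PySem.List.pyGetD (A.map (fun a => prow a.toNat M)) i []) j 0 == 1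
        then (tp.1, 1) else (tp.1 + tp.2, 0))
      (total, 0)
      (by
        intro acc x hx
        rw [PySem.List.mem_pyRange_one] at hx
        have hne : (x == ((A.length : Nat) : Int) - 1) = false := by
          simp only [beq_eq_false_iff_ne, ne_eq]
          omega
        simp only [hne, Bool.false_and, Bool.if_false_left]
        simp)
  rw [hpre]
  rw [scan_plain A M hall j hj0 hjM (A.length - 1) (by omega) (total, 0)]
  simp only [List.foldl_cons, List.foldl_nil]
  -- final element i = n - 1
  have htk : A.take (A.length - 1) ++ [A[A.length - 1]] = A := by
    have h2 : A[A.length - 1]?.toList = [A[A.length - 1]] := by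
      rw [List.getElem?_eq_getElem (by omega)]
      rfl
    rw [← h2, ← List.take_add_one, Nat.sub_add_cancel hn, List.take_length]
  have hrow : PySem.List.pyGetD (A.map (fun a => prow a.toNat M)) (((A.length - 1 : Nat) : Nat) : Int) []
      = prow (A[A.length - 1].toNat) M := by
    rw [PySem.List.pyGetD_natCast, List.getD_eq_getElem _ _ (by simp; omega)]
    simp
  rw [hrow, prow_get _ _ (hall _ (by simp [List.getElem_mem])) j hj0 hjM]
  have hbeq : ((((A.length - 1 : Nat) : Nat) : Int) == ((A.length : Nat) : Int) - 1) = true := by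
    simp only [beq_iff_eq]
    omega
  set F := (A.take (A.length - 1)).foldl (colStep j) (total, 0) with hF
  have hsnd : F.2 = 0 ∨ F.2 = 1 := colfold_snd j _ total 0 (Or.inl rfl)
  have hcr : colRunsP j 0 A =
      ((A.take (A.length - 1) ++ [A[A.length - 1]]).foldl (colStep j) (0, 0)).1
      + ((A.take (A.length - 1) ++ [A[A.length - 1]]).foldl (colStep j) (0, 0)).2 := by
    rw [htk]
    simp only [colRunsP]
    have : (if j < (0:Int) then (1:Int) else 0) = 0 := by rw [if_neg (by omega)]
    rw [this]
  rw [List.foldl_append] at hcr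
  simp only [List.foldl_cons, List.foldl_nil] at hcr
  have hshift := colStep_fold_shift j (A.take (A.length - 1)) total 0
  by_cases hc : j < A[A.length - 1]
  · have hcell : (if j < ((A[A.length - 1].toNat : Nat) : Int) then (1:Int) else 0) = 1 :=
      if_pos (by omega)
    rw [hcell]
    simp only [colStep, if_pos hc] at hcr
    rw [colStep_fold_shift j (A.take (A.length - 1)) 0 0] at hcr
    rw [hshift] at hF
    simp only [hF, hbeq]
    simp
    omega
  · have hcell : (if j < ((A[A.length - 1].toNat : Nat) : Int) then (1:Int) else 0) = 0 :=
      if_neg (by omega)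
    rw [hcell]
    simp only [colStep, if_neg hc] at hcr
    rw [colStep_fold_shift j (A.take (A.length - 1)) 0 0] at hcr
    rw [hshift] at hF
    simp only [hF, hbeq]
    rcases hsnd with h2 | h2 <;> simp [hF] at h2 <;> simp [h2] <;> omega

lemma scan_eq (A : List Int) (M : Nat) (hA : A ≠ []) (hall : ∀ a ∈ A, a.toNat ≤ M) :
    pyA_scan (A.map (fun a => prow a.toNat M)) ((A.length : Nat) : Int)
      = ((List.range M).map (fun (k : Nat) => colRunsP (k : Int) 0 A)).sum := by
  obtain ⟨a0, A', rfl⟩ : ∃ a0 A', A = a0 :: A' := by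
    cases A with
    | nil => exact absurd rfl hA
    | cons a0 A' => exact ⟨a0, A', rfl⟩
  unfold pyA_scan
  have hb : PySem.List.pyGetD ((a0 :: A').map (fun a => prow a.toNat M)) 0 [] = prow a0.toNat M := by
    simp only [List.map_cons, PySem.List.pyGetD_zero_cons]
  rw [hb]
  have hlen : (prow a0.toNat M).length = M := by
    have := hall a0 (by simp)
    simp [prow]
    omega
  rw [hlen]
  rw [PySem.List.foldl_congr_mem _ _ (fun total j => total + colRunsP j 0 (a0 :: A')) _
      (by
        intro acc x hx
        rw [PySem.List.mem_pyRange_one] at hx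
        rw [scan_inner_full (a0 :: A') M hA hall x hx.1 hx.2 acc])]
  rw [PySem.List.foldl_add, PySem.List.pyRange_zero_nat, List.map_map]
  simp only [Function.comp_def]
  simp

lemma solution_eq (A : List Int) (hA : A ≠ []) : solution A = solution_alt A := by
  obtain ⟨m, hm⟩ : ∃ m, PySem.List.max? A id = some m := by
    cases h : PySem.List.max? A id with
    | none => exact absurd ((PySem.List.max?_eq_none_iff A id).mp h) hA
    | some m => exact ⟨m, rfl⟩
  have hmax : ∀ a ∈ A, a ≤ m := fun a ha => PySem.List.max?_isMax hm a ha
  have halt : solution_alt A = (A.foldl bstep (0, 0)).1 := rfl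
  simp only [solution, hm]
  rw [matrix_char A m hmax,
    show ((A.length : Int)) = ((A.length : Nat) : Int) from rfl,
    scan_eq A m.toNat hA (fun a ha => by have := hmax a ha; omega),
    sum_colRunsP A 0 m.toNat (by positivity) (fun a ha => by have := hmax a ha; omega),
    endsCnt_eq_B A 0 (le_refl 0), halt]
  ring

-- ===== VERDICT (by name: the statement is the Claim_ definition above) =====
theorem solution_spec : Claim_equal_solution := by
  intro A _ hpre
  unfold Spec_solution
  exact solution_eq A hpre
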